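-- pv_equiv track=rewrite | github.com/cyberempirex/nexagen | nexagen/utils/text_utils.py | backronym
-- ===== SOURCE A (Python) =====
-- def backronym(letters: str, word_bank: list[str]) -> str | None:
--     """
--     Attempt to build a phrase where each letter of ``letters`` is the
--     first letter of a word from ``word_bank``.
--
--     Args:
--         letters:   Uppercase acronym, e.g. "NEXO"
--         word_bank: List of candidate words to use.
--
--     Returns:
--         A phrase string, or None if not all letters could be matched.
--     """
--     letters = letters.upper()
--     bank_by_letter: dict[str, list[str]] = {}
--     for w in word_bank:
--         if w:
--             bank_by_letter.setdefault(w[0].upper(), []).append(w.capitalize())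
--
--     result: list[str] = []
--     for letter in letters:
--         candidates = bank_by_letter.get(letter)
--         if not candidates:
--             return None
--         result.append(candidates[0])
--     return " ".join(result)
-- ===== SOURCE B (Python) =====
-- def backronym(letters: str, word_bank: list[str]) -> str | None:
--     # Inverted indexing: index the acronym's positions by letter, then stream
--     # the bank once, popping each letter the first time a word matches it.
--     letters = letters.upper()
--     pending: dict[str, list[int]] = {}
--     for i, ch in enumerate(letters):
--         pending.setdefault(ch, []).append(i)
--     slots: list[str | None] = [None] * len(letters)
--     for w in word_bank:
--         if w:
--             idxs = pending.pop(w[0].upper(), None)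
--             if idxs is not None:
--                 cap = w.capitalize()
--                 for i in idxs:
--                     slots[i] = cap
--     if pending:
--         return None
--     return " ".join(slots)
-- ===== Notes on version B (the rewrite author's own statement) =====
-- stated objective: alternative
-- what changed: B inverts A's indexing direction: instead of grouping the bank's words by first letter and then looking each acronym letter up, B indexes the acronym's positions by letter, streams the bank once popping each letter the first time a word matches it, and fills a positional slot array.
import Mathlib
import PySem

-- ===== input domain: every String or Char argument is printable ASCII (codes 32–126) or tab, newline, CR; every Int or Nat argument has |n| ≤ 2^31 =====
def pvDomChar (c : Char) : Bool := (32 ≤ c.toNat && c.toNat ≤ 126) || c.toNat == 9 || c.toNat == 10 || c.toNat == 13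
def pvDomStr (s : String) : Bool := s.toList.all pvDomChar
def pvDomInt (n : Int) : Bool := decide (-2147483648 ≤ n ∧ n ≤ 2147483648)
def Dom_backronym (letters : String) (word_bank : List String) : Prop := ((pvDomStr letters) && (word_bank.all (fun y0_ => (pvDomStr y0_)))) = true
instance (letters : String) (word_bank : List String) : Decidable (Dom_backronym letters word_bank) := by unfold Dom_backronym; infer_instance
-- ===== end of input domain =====

-- B inverts A's indexing: instead of grouping the BANK's words by first letter and looking each
-- acronym letter up, B indexes the ACRONYM's positions by letter and streams the bank once,
-- popping each letter the first time a word matches it (objective: alternative; return value only).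

-- shared helper: Python's w.capitalize() (exact on ASCII: first char upper, rest lower)
def pvCap (w : String) : String :=
  match w.toList with
  | [] => ""
  | c :: cs => String.ofList (PySem.Chars.upperChar c :: PySem.Chars.lower cs)

-- ===== PORT A =====
-- the dict-building loop: for w in word_bank: if w: bank.setdefault(w[0].upper(), []).append(w.capitalize())
def backronym_buildBank (word_bank : List String) : PySem.Dict String (List String) :=
  word_bank.foldl (fun d w =>
    match w.toList with
    | [] => d
    | c :: _ => d.modify (String.ofList [PySem.Chars.upperChar c]) [] (· ++ [pvCap w]))
    PySem.Dict.empty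

-- the result loop: for letter in letters: candidates = bank.get(letter); if not candidates: return None; result.append(candidates[0])
def backronym_loopA (d : PySem.Dict String (List String)) : List Char → Option (List String)
  | [] => some []
  | c :: cs =>
    match d.get? (String.ofList [c]) with
    | none => none
    | some [] => none
    | some (x :: _) => (backronym_loopA d cs).map (fun r => x :: r)

def backronym (letters : String) (word_bank : List String) : Option String :=
  (backronym_loopA (backronym_buildBank word_bank)
      (PySem.Chars.upper letters.toList)).map (fun parts => PySem.Str.join " " parts)

-- ===== PORT B =====
-- B's first loop: for i, ch in enumerate(letters): pending.setdefault(ch, []).append(i)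
def backronym_pend (U : List Char) : PySem.Dict Char (List Int) :=
  (PySem.List.enumerate U).foldl (fun d p => d.modify p.2 [] (· ++ [p.1])) PySem.Dict.empty

-- B's innermost loop: for i in idxs: slots[i] = cap   (i.toNat is exact: enumerate indices are ≥ 0)
def backronym_setAll (cap : String) (idxs : List Int) (slots : List (Option String)) : List (Option String) :=
  idxs.foldl (fun s i => s.set i.toNat (some cap)) slots

-- B's bank loop body: if w: idxs = pending.pop(w[0].upper(), None); if idxs is not None: fill
def backronym_stepB (st : PySem.Dict Char (List Int) × List (Option String)) (w : String) :
    PySem.Dict Char (List Int) × List (Option String) :=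
  match w.toList with
  | [] => st
  | a :: _ =>
    match st.1.get? (PySem.Chars.upperChar a) with
    | none => st
    | some idxs => (st.1.erase (PySem.Chars.upperChar a), backronym_setAll (pvCap w) idxs st.2)

-- if pending: return None; return " ".join(slots)  (getD "" is exact: pending empty ⇒ every slot filled)
def backronym_alt (letters : String) (word_bank : List String) : Option String :=
  match word_bank.foldl backronym_stepB
      (backronym_pend (PySem.Chars.upper letters.toList),
       (PySem.Chars.upper letters.toList).map (fun _ => none)) with
  | (pend, slots) =>
    if pend.items.isEmpty then
      some (PySem.Str.join " " (slots.map (fun s => s.getD "")))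
    else none

-- ===== PRECONDITION & SPEC =====
def Spec_backronym (letters : String) (word_bank : List String) (out : Option String) : Prop := out = backronym_alt letters word_bank
instance (letters : String) (word_bank : List String) (out : Option String) : Decidable (Spec_backronym letters word_bank out) := by unfold Spec_backronym; infer_instance

-- ===== CLAIM (what is proved, stated in full; the proofs are below) =====
def Claim_equal_backronym : Prop := ∀ (letters : String) (word_bank : List String), Dom_backronym letters word_bank → Spec_backronym letters word_bank (backronym letters word_bank)

-- ===== LEMMAS AND PROOFS =====

-- proof-side: does w start (case-insensitively) with c?
def backronym_match (c : Char) (w : String) : Bool :=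
  match w.toList with
  | [] => false
  | a :: _ => PySem.Chars.upperChar a == c

-- proof-side: the value every scheme assigns to letter c — the first matching word, capitalized
def backronym_gFind (wb : List String) (c : Char) : Option String :=
  (wb.find? (backronym_match c)).map pvCap

-- proof-side intermediate: per-letter scan form of A's second loop
def backronym_loopB (word_bank : List String) : List Char → Option (List String)
  | [] => some []
  | c :: cs =>
    match word_bank.find? (backronym_match c) with
    | none => none
    | some w => (backronym_loopB word_bank cs).map (fun r => pvCap w :: r)

-- proof-side: sequence the per-letter values (none anywhere ⇒ none)
def backronym_collect : List (Option String) → Option (List String)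
  | [] => some []
  | none :: _ => none
  | some x :: rest => (backronym_collect rest).map (fun r => x :: r)

-- proof-side: the positions of letter c in the acronym
def backronym_pos (U : List Char) (c : Char) : List Int :=
  ((PySem.List.enumerate U).filter (fun p => p.2 == c)).map (·.1)

-- proof-side: g overridden by the first bank match where g is still unset
def backronym_merge (g : Char → Option String) (wb : List String) (c : Char) : Option String :=
  match g c with
  | some x => some x
  | none => backronym_gFind wb c

-- ---------- A side ----------

def backronym_keyval (w : String) : Option (String × String) :=
  match w.toList with
  | [] => none
  | c :: _ => some (String.ofList [PySem.Chars.upperChar c], pvCap w)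

theorem buildBank_eq_pairs (wb : List String) (d : PySem.Dict String (List String)) :
    wb.foldl (fun d w =>
      match w.toList with
      | [] => d
      | c :: _ => d.modify (String.ofList [PySem.Chars.upperChar c]) [] (· ++ [pvCap w])) d
    = (wb.filterMap backronym_keyval).foldl
        (fun d p => d.modify p.1 [] (· ++ [p.2])) d := by
  induction wb generalizing d with
  | nil => rfl
  | cons w ws ih =>
    simp only [List.foldl_cons, List.filterMap_cons, backronym_keyval]
    cases h : w.toList with
    | nil => simpa [h] using ih d
    | cons c rest => simpa [h] using ih _

theorem mk_singleton_beq (a b : Char) :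
    (String.ofList [a] == String.ofList [b]) = (a == b) := by
  simp [String.ofList_inj]

theorem pairs_filter_eq (wb : List String) (c : Char) :
    ((wb.filterMap backronym_keyval).filter (fun p => p.1 == String.ofList [c])).map (·.2)
    = (wb.filter (backronym_match c)).map pvCap := by
  induction wb with
  | nil => rfl
  | cons w ws ih =>
    simp only [List.filterMap_cons, backronym_keyval]
    cases h : w.toList with
    | nil => simpa [List.filter_cons, backronym_match, h] using ih
    | cons a rest =>
      simp only [List.filter_cons, backronym_match, h, mk_singleton_beq]
      cases hb : (PySem.Chars.upperChar a == c) with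
      | false => simpa using ih
      | true => simpa using ih

theorem bank_getD (wb : List String) (c : Char) :
    (backronym_buildBank wb).getD (String.ofList [c]) []
    = (wb.filter (backronym_match c)).map pvCap := by
  rw [backronym_buildBank, buildBank_eq_pairs,
    PySem.Dict.getD_foldl_modify_append, pairs_filter_eq]
  simp

theorem loopA_eq_loopB (wb : List String) (cs : List Char) :
    backronym_loopA (backronym_buildBank wb) cs = backronym_loopB wb cs := by
  induction cs with
  | nil => rfl
  | cons c rest ih =>
    have hD := bank_getD wb c
    have hgetD : (backronym_buildBank wb).getD (String.ofList [c]) []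
        = ((backronym_buildBank wb).get? (String.ofList [c])).getD [] := by
      simp [PySem.Dict.getD, PySem.Dict.get?]
    rw [backronym_loopA, backronym_loopB]
    cases hf : wb.find? (backronym_match c) with
    | none =>
      have hfil : wb.filter (backronym_match c) = [] := by
        rw [List.filter_eq_nil_iff]
        intro x hx
        have := List.find?_eq_none.mp hf x hx
        simpa using this
      have hempty : ((backronym_buildBank wb).get? (String.ofList [c])).getD [] = [] := by
        rw [← hgetD, hD, hfil]; rfl
      cases hg : (backronym_buildBank wb).get? (String.ofList [c]) with
      | none => rfl
      | some v =>
        cases v with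
        | nil => rfl
        | cons x xs => simp [hg] at hempty
    | some w =>
      have hhead : (wb.filter (backronym_match c)).head? = some w := by
        rw [List.head?_filter]; exact hf
      obtain ⟨ws, hws⟩ : ∃ ws, wb.filter (backronym_match c) = w :: ws := by
        cases hfc : wb.filter (backronym_match c) with
        | nil => rw [hfc] at hhead; simp at hhead
        | cons y ys =>
          rw [hfc] at hhead
          simp at hhead
          exact ⟨ys, by rw [hhead]⟩
      have hg : (backronym_buildBank wb).get? (String.ofList [c])
          = some (pvCap w :: ws.map pvCap) := by
        have hne : ((backronym_buildBank wb).get? (String.ofList [c])).getD []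
            = pvCap w :: ws.map pvCap := by
          rw [← hgetD, hD, hws]; rfl
        cases hg' : (backronym_buildBank wb).get? (String.ofList [c]) with
        | none => rw [hg'] at hne; simp at hne
        | some v => rw [hg'] at hne; simp at hne; rw [hne]
      rw [hg, ih]

theorem loopB_eq_collect (wb : List String) (cs : List Char) :
    backronym_loopB wb cs = backronym_collect (cs.map (backronym_gFind wb)) := by
  induction cs with
  | nil => rfl
  | cons c rest ih =>
    rw [backronym_loopB, List.map_cons]
    cases hf : wb.find? (backronym_match c) with
    | none => simp [backronym_gFind, hf, backronym_collect]
    | some w => simp [backronym_gFind, hf, backronym_collect, ih]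

-- ---------- gFind unfolding ----------

theorem gFind_cons_nil (w : String) (ws : List String) (c : Char) (h : w.toList = []) :
    backronym_gFind (w :: ws) c = backronym_gFind ws c := by
  simp [backronym_gFind, backronym_match, h]

theorem gFind_cons (w : String) (ws : List String) (c a : Char) (rest : List Char)
    (h : w.toList = a :: rest) :
    backronym_gFind (w :: ws) c
    = if PySem.Chars.upperChar a == c then some (pvCap w) else backronym_gFind ws c := by
  simp only [backronym_gFind, List.find?_cons, backronym_match, h]
  cases hb : (PySem.Chars.upperChar a == c) <;> simp

-- ---------- the pending dictionary ----------

theorem dict_get?_erase {κ ν : Type} [BEq κ] [LawfulBEq κ] [DecidableEq κ]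
    (d : PySem.Dict κ ν) (k c : κ) :
    (d.erase k).get? c = if c = k then none else d.get? c := by
  obtain ⟨items⟩ := d
  simp only [PySem.Dict.erase, PySem.Dict.get?]
  induction items with
  | nil => simp
  | cons p rest ih =>
    by_cases hpk : p.1 = k
    · have hfc : List.filter (fun q => !q.1 == k) (p :: rest)
          = List.filter (fun q => !q.1 == k) rest := by
        simp [hpk]
      rw [hfc, ih]
      by_cases hck : c = k
      · simp [hck]
      · have hpc : (p.1 == c) = false := by
          rw [hpk]; simp; exact fun h => hck h.symm
        simp [hck, hpc]
    · have hfc : List.filter (fun q => !q.1 == k) (p :: rest)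
          = p :: List.filter (fun q => !q.1 == k) rest := by
        simp [hpk]
      rw [hfc]
      by_cases hpc : p.1 = c
      · have hck : ¬ c = k := fun h => hpk (by rw [hpc, h])
        simp [hpc, hck]
      · have hb : (p.1 == c) = false := by simp [hpc]
        simp only [List.find?_cons, hb]
        rw [ih]

theorem pend_get? (U : List Char) (c : Char) :
    (backronym_pend U).get? c = if c ∈ U then some (backronym_pos U c) else none := by
  have hkeys : (backronym_pend U).keys = PySem.Set.ofList U := by
    unfold backronym_pend
    rw [PySem.Dict.keys_foldl_modify_key (PySem.List.enumerate U) (fun p => p.2) []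
      (fun _ p => (· ++ [p.1])) PySem.Dict.empty]
    simp [PySem.List.map_snd_enumerate, PySem.Dict.keys_empty, PySem.Set.update,
      PySem.Set.ofList]
  have hgetD : (backronym_pend U).getD c [] = backronym_pos U c := by
    unfold backronym_pend
    have hmap : (PySem.List.enumerate U).foldl
        (fun d p => d.modify p.2 [] (· ++ [p.1])) PySem.Dict.empty
        = ((PySem.List.enumerate U).map (fun p => (p.2, p.1))).foldl
            (fun d p => d.modify p.1 [] (· ++ [p.2])) PySem.Dict.empty := by
      rw [List.foldl_map]
    rw [hmap, PySem.Dict.getD_foldl_modify_append]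
    simp [backronym_pos, List.filter_map, List.map_map, Function.comp_def]
  by_cases hc : c ∈ U
  · have hmem : c ∈ (backronym_pend U).keys := by
      rw [hkeys]; exact (PySem.Set.mem_ofList U c).mpr hc
    cases hg : (backronym_pend U).get? c with
    | none => exact absurd ((PySem.Dict.get?_eq_none_iff_not_mem_keys _ _).mp hg) (by simp [hmem])
    | some v =>
      rw [PySem.Dict.getD_eq_get?_getD, hg] at hgetD
      simp at hgetD
      simp [hc, hgetD]
  · rw [if_neg hc]
    rw [PySem.Dict.get?_eq_none_iff_not_mem_keys]
    rw [hkeys]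
    exact fun hm => hc ((PySem.Set.mem_ofList U c).mp hm)

-- ---------- the slot array ----------

theorem getElem?_setAll (cap : String) (idxs : List Int) (hpos : ∀ i ∈ idxs, 0 ≤ i)
    (slots : List (Option String)) (j : Nat) :
    (backronym_setAll cap idxs slots)[j]?
    = if (j : Int) ∈ idxs ∧ j < slots.length then some (some cap) else slots[j]? := by
  induction idxs generalizing slots with
  | nil => simp [backronym_setAll]
  | cons i rest ih =>
    have h0 : 0 ≤ i := hpos i (by simp)
    have hrest : ∀ x ∈ rest, 0 ≤ x := fun x hx => hpos x (by simp [hx])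
    have hstep : backronym_setAll cap (i :: rest) slots
        = backronym_setAll cap rest (slots.set i.toNat (some cap)) := rfl
    rw [hstep, ih hrest]
    by_cases hjr : (j : Int) ∈ rest
    · by_cases hjl : j < slots.length
      · simp [hjr, hjl]
      · have h1 : ¬ ((j : Int) ∈ rest ∧ j < (slots.set i.toNat (some cap)).length) := by
          simp [hjl]
        have h2 : ¬ ((j : Int) ∈ i :: rest ∧ j < slots.length) := by simp [hjl]
        rw [if_neg h1, if_neg h2]
        have hlen : slots.length ≤ j := by omega
        rw [List.getElem?_eq_none (by simpa using hlen), List.getElem?_eq_none hlen]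
    · have h1 : ¬ ((j : Int) ∈ rest ∧ j < (slots.set i.toNat (some cap)).length) := by
        simp [hjr]
      rw [if_neg h1]
      by_cases hji : (j : Int) = i
      · have hnat : i.toNat = j := by omega
        by_cases hjl : j < slots.length
        · have h2 : (j : Int) ∈ i :: rest ∧ j < slots.length := ⟨by simp [hji], hjl⟩
          rw [if_pos h2, ← hnat]
          rw [List.getElem?_set_self (by omega)]
        · have h2 : ¬ ((j : Int) ∈ i :: rest ∧ j < slots.length) := by simp [hjl]
          rw [if_neg h2]
          have hlen : slots.length ≤ j := by omega
          rw [List.getElem?_eq_none (by simpa using hlen), List.getElem?_eq_none hlen]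
      · have h2 : ¬ ((j : Int) ∈ i :: rest ∧ j < slots.length) := by
          simp only [List.mem_cons, not_and]
          intro hm _
          rcases hm with h | h
          · exact hji h
          · exact hjr h
        rw [if_neg h2]
        have hnat : i.toNat ≠ j := by omega
        rw [List.getElem?_set_ne hnat]

theorem mem_pos_iff (U : List Char) (c : Char) (j : Nat) (hj : j < U.length) :
    ((j : Int) ∈ backronym_pos U c) ↔ U[j] = c := by
  unfold backronym_pos
  simp only [List.mem_map, List.mem_filter, PySem.List.mem_enumerate_iff]
  constructor
  · rintro ⟨p, ⟨⟨k, hk, rfl⟩, hbeq⟩, hfst⟩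
    simp only at hbeq hfst
    have : k = j := by omega
    subst this
    simpa using hbeq
  · intro h
    exact ⟨((j : Int), U[j]), ⟨⟨j, hj, by simp⟩, by simpa using h⟩, rfl⟩

theorem pos_nonneg (U : List Char) (c : Char) : ∀ i ∈ backronym_pos U c, 0 ≤ i := by
  intro i hi
  unfold backronym_pos at hi
  simp only [List.mem_map, List.mem_filter, PySem.List.mem_enumerate_iff] at hi
  obtain ⟨p, ⟨⟨k, hk, rfl⟩, _⟩, hfst⟩ := hi
  simp only at hfst
  omega

theorem setAll_pos (U : List Char) (init : Char) (cap : String) (g : Char → Option String) :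
    backronym_setAll cap (backronym_pos U init) (U.map g)
    = U.map (fun c => if c = init then some cap else g c) := by
  apply List.ext_getElem?
  intro j
  rw [getElem?_setAll cap _ (pos_nonneg U init) _ j]
  by_cases hj : j < U.length
  · have hmem := mem_pos_iff U init j hj
    have hg1 : (U.map g)[j]? = some (g U[j]) := by
      simp [List.getElem?_map, List.getElem?_eq_getElem hj]
    have hg2 : (U.map (fun c => if c = init then some cap else g c))[j]?
        = some (if U[j] = init then some cap else g U[j]) := by
      simp [List.getElem?_map, List.getElem?_eq_getElem hj]
    by_cases hUj : U[j] = init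
    · rw [if_pos ⟨hmem.mpr hUj, by simpa using hj⟩, hg2, if_pos hUj]
    · rw [if_neg (fun hc => hUj (hmem.mp hc.1)), hg1, hg2, if_neg hUj]
  · have hlen : U.length ≤ j := by omega
    rw [if_neg (fun hc => hj (by simpa using hc.2))]
    rw [List.getElem?_eq_none (by simpa using hlen), List.getElem?_eq_none (by simpa using hlen)]

-- ---------- the bank loop invariant ----------

theorem foldB_inv (U : List Char) (wb : List String) :
    ∀ (g : Char → Option String) (d : PySem.Dict Char (List Int)),
    (∀ c, d.get? c = if c ∈ U ∧ g c = none then some (backronym_pos U c) else none) →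
    (wb.foldl backronym_stepB (d, U.map g)).2 = U.map (backronym_merge g wb) ∧
    (∀ c, (wb.foldl backronym_stepB (d, U.map g)).1.get? c =
      if c ∈ U ∧ backronym_merge g wb c = none then some (backronym_pos U c) else none) := by
  induction wb with
  | nil =>
    intro g d H
    have hm : ∀ c, backronym_merge g [] c = g c := by
      intro c; cases h : g c <;> simp [backronym_merge, h, backronym_gFind]
    simp only [List.foldl_nil]
    constructor
    · exact (List.map_congr_left (fun c _ => hm c)).symm
    · intro c; rw [hm c]; exact H c
  | cons w ws ih =>
    intro g d H
    simp only [List.foldl_cons]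
    cases hw : w.toList with
    | nil =>
      have hstep : backronym_stepB (d, U.map g) w = (d, U.map g) := by
        simp [backronym_stepB, hw]
      rw [hstep]
      obtain ⟨h2, h1⟩ := ih g d H
      have hm : ∀ c, backronym_merge g (w :: ws) c = backronym_merge g ws c := by
        intro c; cases hgc : g c <;>
          simp [backronym_merge, hgc, gFind_cons_nil w ws c hw]
      refine ⟨?_, ?_⟩
      · rw [h2]; exact (List.map_congr_left (fun c _ => (hm c).symm))
      · intro c; rw [hm c]; exact h1 c
    | cons a rest =>
      cases hd : d.get? (PySem.Chars.upperChar a) with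
      | none =>
        have hstep : backronym_stepB (d, U.map g) w = (d, U.map g) := by
          simp [backronym_stepB, hw, hd]
        rw [hstep]
        obtain ⟨h2, h1⟩ := ih g d H
        have hni : ¬(PySem.Chars.upperChar a ∈ U ∧ g (PySem.Chars.upperChar a) = none) := by
          intro hc; rw [H _] at hd; simp [hc] at hd
        have hm : ∀ c ∈ U, backronym_merge g (w :: ws) c = backronym_merge g ws c := by
          intro c hc
          cases hgc : g c with
          | some x => simp [backronym_merge, hgc]
          | none =>
            by_cases hci : PySem.Chars.upperChar a = c
            · exact absurd ⟨hci ▸ hc, hci ▸ hgc⟩ hni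
            · simp [backronym_merge, hgc, gFind_cons w ws c a rest hw, hci]
        refine ⟨?_, ?_⟩
        · rw [h2]; exact (List.map_congr_left (fun c hc => (hm c hc).symm))
        · intro c
          by_cases hcU : c ∈ U
          · rw [h1 c, hm c hcU]
          · rw [h1 c]; simp [hcU]
      | some idxs =>
        have hcond : PySem.Chars.upperChar a ∈ U ∧ g (PySem.Chars.upperChar a) = none := by
          by_contra hc; rw [H _, if_neg hc] at hd; simp at hd
        have hidxs : idxs = backronym_pos U (PySem.Chars.upperChar a) := by
          rw [H _, if_pos hcond] at hd; exact (Option.some.inj hd).symm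
        have hstep : backronym_stepB (d, U.map g) w
            = (d.erase (PySem.Chars.upperChar a),
               backronym_setAll (pvCap w) idxs (U.map g)) := by
          simp [backronym_stepB, hw, hd]
        rw [hstep, hidxs, setAll_pos]
        have H2 : ∀ c, (d.erase (PySem.Chars.upperChar a)).get? c =
            if c ∈ U ∧ (if c = PySem.Chars.upperChar a then some (pvCap w) else g c) = none
            then some (backronym_pos U c) else none := by
          intro c
          rw [dict_get?_erase]
          by_cases hci : c = PySem.Chars.upperChar a
          · simp [hci]
          · rw [if_neg hci, H c]; simp [hci]
        obtain ⟨h2, h1⟩ := ih _ _ H2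
        have hm : ∀ c, backronym_merge
            (fun c => if c = PySem.Chars.upperChar a then some (pvCap w) else g c) ws c
            = backronym_merge g (w :: ws) c := by
          intro c
          by_cases hci : c = PySem.Chars.upperChar a
          · subst hci
            simp [backronym_merge, hcond.2, gFind_cons w ws _ a rest hw]
          · cases hgc : g c with
            | some x => simp [backronym_merge, hci, hgc]
            | none =>
              have hne : (PySem.Chars.upperChar a == c) = false := by
                simp; exact fun e => hci e.symm
              simp [backronym_merge, hci, hgc, gFind_cons w ws c a rest hw, hne]
        refine ⟨?_, ?_⟩
        · rw [h2]; exact (List.map_congr_left (fun c _ => hm c))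
        · intro c; rw [h1 c, hm c]

-- ---------- sequencing ----------

theorem collect_all_some (xs : List (Option String)) (h : ∀ x ∈ xs, x ≠ none) :
    backronym_collect xs = some (xs.map (fun s => s.getD "")) := by
  induction xs with
  | nil => rfl
  | cons x rest ih =>
    cases x with
    | none => exact absurd rfl (h none (by simp))
    | some v =>
      rw [List.map_cons, backronym_collect, ih (fun y hy => h y (by simp [hy]))]
      rfl

theorem collect_none_of_mem (xs : List (Option String)) (h : none ∈ xs) :
    backronym_collect xs = none := by
  induction xs with
  | nil => simp at h
  | cons x rest ih =>
    cases x with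
    | none => rfl
    | some v =>
      have : none ∈ rest := by simpa using h
      rw [backronym_collect, ih this]
      rfl

theorem items_nil_of_get?_none {κ ν : Type} [BEq κ] [LawfulBEq κ]
    (d : PySem.Dict κ ν) (h : ∀ c, d.get? c = none) : d.items = [] := by
  obtain ⟨items⟩ := d
  cases items with
  | nil => rfl
  | cons p rest =>
    obtain ⟨k, v⟩ := p
    have := h k
    simp [PySem.Dict.get?] at this

theorem items_ne_nil_of_get?_some {κ ν : Type} [BEq κ]
    (d : PySem.Dict κ ν) (k : κ) (v : ν) (h : d.get? k = some v) : d.items ≠ [] := by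
  intro he
  obtain ⟨items⟩ := d
  simp at he
  subst he
  simp [PySem.Dict.get?] at h

-- ===== VERDICT (by name: the statement is the Claim_ definition above) =====
theorem backronym_spec : Claim_equal_backronym := by
  intro letters word_bank _
  unfold Spec_backronym backronym backronym_alt
  rw [loopA_eq_loopB, loopB_eq_collect]
  have H0 : ∀ c, (backronym_pend (PySem.Chars.upper letters.toList)).get? c =
      if c ∈ PySem.Chars.upper letters.toList ∧ (fun _ => (none : Option String)) c = none
      then some (backronym_pos (PySem.Chars.upper letters.toList) c) else none := by
    intro c; rw [pend_get?]; simp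
  obtain ⟨h2, h1⟩ := foldB_inv (PySem.Chars.upper letters.toList) word_bank (fun _ => none)
    (backronym_pend (PySem.Chars.upper letters.toList)) H0
  have hmg : backronym_merge (fun _ => none) word_bank = backronym_gFind word_bank := by
    funext c; rfl
  rw [hmg] at h2 h1
  rcases hP : word_bank.foldl backronym_stepB
      (backronym_pend (PySem.Chars.upper letters.toList),
       (PySem.Chars.upper letters.toList).map (fun _ => none)) with ⟨pend, slots⟩
  rw [hP] at h2 h1
  simp only at h2 h1
  change _ = if pend.items.isEmpty then
      some (PySem.Str.join " " (slots.map (fun s => s.getD ""))) else none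
  by_cases hall : ∀ c ∈ PySem.Chars.upper letters.toList, backronym_gFind word_bank c ≠ none
  · have hnone : ∀ c, pend.get? c = none := by
      intro c; rw [h1 c]
      by_cases hc : c ∈ PySem.Chars.upper letters.toList
      · simp [hc, hall c hc]
      · simp [hc]
    have hitems : pend.items = [] := items_nil_of_get?_none pend hnone
    have hcol : backronym_collect
        ((PySem.Chars.upper letters.toList).map (backronym_gFind word_bank))
        = some (((PySem.Chars.upper letters.toList).map (backronym_gFind word_bank)).map
            (fun s => s.getD "")) := by
      apply collect_all_some
      intro x hx
      obtain ⟨c, hc, rfl⟩ := List.mem_map.mp hx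
      exact hall c hc
    rw [hcol, hitems, h2]
    simp
  · push_neg at hall
    obtain ⟨c₀, hc₀U, hc₀⟩ := hall
    have hcol : backronym_collect
        ((PySem.Chars.upper letters.toList).map (backronym_gFind word_bank)) = none := by
      apply collect_none_of_mem
      exact List.mem_map.mpr ⟨c₀, hc₀U, hc₀⟩
    have hsome : pend.get? c₀ = some (backronym_pos (PySem.Chars.upper letters.toList) c₀) := by
      rw [h1 c₀]; simp [hc₀U, hc₀]
    have hne : pend.items ≠ [] := items_ne_nil_of_get?_some pend c₀ _ hsome
    rw [hcol]
    simp [List.isEmpty_iff, hne]
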